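-- pv_equiv track=rewrite | github.com/liupengsay/PyIsTheBestLang | src/dp/state_dp/problem.py | lc_1655
-- ===== SOURCE A (Python) =====
-- import heapq
-- from collections import Counter
-- from functools import lru_cache
-- from typing import List
--
-- def lc_1655(nums: List[int], quantity: List[int]) -> bool:
--     """
--     url: https://leetcode.cn/problems/distribute-repeating-integers/
--     tag: state_dp
--     """
--
--     # 线性索引|brute_force子集state_compress
--     @lru_cache(None)
--     def dfs(i, state):
--         if not state:
--             return True
--         if i == m:
--             return False
--         x = cnt[i]
--         sub = state
--         while sub:
--             cost = sum(quantity[j] for j in range(n) if sub & (1 << j))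
--             if cost <= x and dfs(i + 1, state ^ sub):
--                 return True
--             sub = (sub - 1) & state
--         return False
--
--     cnt = list(Counter(nums).values())
--     n = len(quantity)
--     cnt = heapq.nlargest(n, cnt)
--     m = len(cnt)
--     return dfs(0, (1 << n) - 1)
-- ===== SOURCE B (Python) =====
-- from collections import Counter
-- from typing import List
--
--
-- def lc_1655(nums: List[int], quantity: List[int]) -> bool:
--     n = len(quantity)
--     # precompute all 2^n subset sums of quantity by doubling
--     subsum = [0]
--     for q in quantity:
--         subsum += [s + q for s in subsum]
--     cnt = sorted(Counter(nums).values(), reverse=True)[:n]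
--     # forward BFS over frontier sets of still-unserved order masks
--     layer = {(1 << n) - 1}
--     for x in cnt:
--         if 0 in layer:
--             return True
--         nxt = set()
--         for s in layer:
--             sub = s
--             while sub:
--                 if subsum[sub] <= x:
--                     nxt.add(s ^ sub)
--                 sub = (sub - 1) & s
--         layer = nxt
--     return 0 in layer
-- ===== Notes on version B (the rewrite author's own statement) =====
-- stated objective: alternative
-- what changed: Replaces A's memoized top-down subset recursion, which re-sums the cost of every candidate subset inside its inner loop, by a forward breadth-first search over frontier sets of still-unserved order masks, with all 2^n subset sums precomputed once by list doubling so each transition test is a single table lookup.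
import Mathlib
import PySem

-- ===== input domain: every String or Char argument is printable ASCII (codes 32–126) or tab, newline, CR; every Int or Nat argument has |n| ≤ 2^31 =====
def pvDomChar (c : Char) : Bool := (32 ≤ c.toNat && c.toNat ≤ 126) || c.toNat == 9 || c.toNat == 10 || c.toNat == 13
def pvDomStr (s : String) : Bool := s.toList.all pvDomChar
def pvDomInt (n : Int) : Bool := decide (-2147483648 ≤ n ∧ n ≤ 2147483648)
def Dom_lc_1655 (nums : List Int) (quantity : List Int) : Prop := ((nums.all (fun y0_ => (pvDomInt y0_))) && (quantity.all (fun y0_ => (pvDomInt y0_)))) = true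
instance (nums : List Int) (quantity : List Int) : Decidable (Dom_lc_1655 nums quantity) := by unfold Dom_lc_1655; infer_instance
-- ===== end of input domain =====

-- B replaces A's memoized top-down subset recursion (which re-sums each candidate subset's cost)
-- by a forward frontier-set BFS over still-unserved order masks with all subset sums precomputed
-- once by doubling; objective: alternative (a genuinely different algorithm of similar cost).

-- ===== PORT A =====
-- cost = sum(quantity[j] for j in range(n) if sub & (1 << j)); j < len(quantity) always, so getD is exact
def pvCostA (q : List Int) (sub : Nat) : Int :=
  (List.range q.length).foldl (fun a j => if sub.testBit j then a + q.getD j 0 else a) 0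

-- the `while sub:` loop inside dfs; `next` is dfs(i+1, ·)
def pvLoopA (q : List Int) (x : Int) (next : Nat → Bool) (state : Nat) (sub : Nat) : Bool :=
  if sub = 0 then false
  else if decide (pvCostA q sub ≤ x) && next (state ^^^ sub) then true
  else pvLoopA q x next state ((sub - 1) &&& state)
termination_by sub
decreasing_by have h := Nat.and_le_left (n := sub - 1) (m := state); omega

-- dfs(i, state), recursing on the suffix cnt[i:] of the count list
def pvDfsA (q : List Int) : List Int → Nat → Bool
  | [], state => if state = 0 then true else false
  | x :: rest, state => if state = 0 then true else pvLoopA q x (pvDfsA q rest) state state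

def lc_1655 (nums : List Int) (quantity : List Int) : Bool :=
  let cnt0 := (PySem.Dict.counter nums).values
  let n := quantity.length
  -- heapq.nlargest(n, cnt) is documented equivalent to sorted(cnt, reverse=True)[:n]
  let cnt := (PySem.List.sorted cnt0 (fun v => v) true).take n
  pvDfsA quantity cnt ((1 <<< n) - 1)

-- ===== PORT B =====
-- subsum = [0]; for q in quantity: subsum += [s + q for s in subsum]
def pvSubsum (quantity : List Int) : List Int :=
  quantity.foldl (fun acc q => acc ++ acc.map (fun s => s + q)) [0]

-- the `while sub:` loop of one frontier state s: add every affordable successor to nxt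
def pvExpandLoop (subsum : List Int) (x : Int) (s : Nat) (nxt : PySem.Set Nat) (sub : Nat) :
    PySem.Set Nat :=
  if sub = 0 then nxt
  else pvExpandLoop subsum x s
    (if decide (subsum.getD sub 0 ≤ x) then PySem.Set.add nxt (s ^^^ sub) else nxt)
    ((sub - 1) &&& s)
termination_by sub
decreasing_by have h := Nat.and_le_left (n := sub - 1) (m := s); omega

-- the `for x in cnt:` loop over frontier sets (result is a membership test, set order immaterial)
def pvReach (subsum : List Int) : List Int → PySem.Set Nat → Bool
  | [], layer => PySem.Set.contains layer 0
  | x :: rest, layer =>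
    if PySem.Set.contains layer 0 then true
    else pvReach subsum rest
      (layer.foldl (fun nxt s => pvExpandLoop subsum x s nxt s) PySem.Set.empty)

def lc_1655_alt (nums : List Int) (quantity : List Int) : Bool :=
  let n := quantity.length
  let subsum := pvSubsum quantity
  let cnt := (PySem.List.sorted (PySem.Dict.counter nums).values (fun v => v) true).take n
  pvReach subsum cnt (PySem.Set.ofList [(1 <<< n) - 1])

-- ===== PRECONDITION & SPEC =====
def Spec_lc_1655 (nums : List Int) (quantity : List Int) (out : Bool) : Prop := out = lc_1655_alt nums quantity
instance (nums : List Int) (quantity : List Int) (out : Bool) : Decidable (Spec_lc_1655 nums quantity out) := by unfold Spec_lc_1655; infer_instance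

-- ===== CLAIM (what is proved, stated in full; the proofs are below) =====
def Claim_equal_lc_1655 : Prop := ∀ (nums : List Int) (quantity : List Int), Dom_lc_1655 nums quantity → Spec_lc_1655 nums quantity (lc_1655 nums quantity)

-- ===== LEMMAS AND PROOFS =====

-- the subset cost read bit by bit: reference form both ports are compared against
def pvCostBits : List Int → Nat → Int
  | [], _ => 0
  | y :: ys, m => (if m % 2 = 1 then y else 0) + pvCostBits ys (m / 2)

theorem pvCostA_fold (q : List Int) : ∀ (sub : Nat) (a : Int),
    (List.range q.length).foldl (fun a j => if sub.testBit j then a + q.getD j 0 else a) a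
      = a + pvCostBits q sub := by
  induction q with
  | nil => intro sub a; simp [pvCostBits]
  | cons y ys ih =>
    intro sub a
    rw [List.length_cons, List.range_succ_eq_map, List.foldl_cons, List.foldl_map]
    have hfun : (fun (a : Int) (j : Nat) => if sub.testBit (j+1) then a + (y::ys).getD (j+1) 0 else a)
        = fun (a : Int) (j : Nat) => if (sub/2).testBit j then a + ys.getD j 0 else a := by
      funext a j
      rw [Nat.testBit_add_one]
      rfl
    simp only [hfun]
    rw [ih (sub/2)]
    simp only [pvCostBits, Nat.testBit_zero, List.getD_cons_zero]
    by_cases h : sub % 2 = 1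
    · simp only [h]
      simp only [decide_true, if_pos]
      ring
    · simp [h]

theorem pvCostA_eq (q : List Int) (sub : Nat) : pvCostA q sub = pvCostBits q sub := by
  have h := pvCostA_fold q sub 0
  rw [zero_add] at h
  exact h

theorem pvCostBits_mod (q : List Int) : ∀ m, pvCostBits q (m % 2 ^ q.length) = pvCostBits q m := by
  induction q with
  | nil => intro m; simp [pvCostBits]
  | cons y ys ih =>
    intro m
    simp only [pvCostBits, List.length_cons]
    have h2 : (2:Nat) ^ (ys.length + 1) = 2 * 2 ^ ys.length := by ring
    have hm : m % 2 ^ (ys.length + 1) % 2 = m % 2 := by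
      rw [h2]; exact Nat.mod_mod_of_dvd m ⟨2 ^ ys.length, rfl⟩
    have hd : m % 2 ^ (ys.length + 1) / 2 = m / 2 % 2 ^ ys.length := by
      rw [h2]; exact Nat.mod_mul_right_div_self m 2 (2 ^ ys.length)
    simp only [hm, hd, ih]

theorem pvCostBits_concat (q : List Int) (x : Int) : ∀ m,
    pvCostBits (q ++ [x]) m = pvCostBits q m + (if m.testBit q.length then x else 0) := by
  induction q with
  | nil => intro m; simp [pvCostBits, Nat.testBit_zero, add_comm]
  | cons y ys ih =>
    intro m
    simp only [List.cons_append, pvCostBits, ih (m/2), List.length_cons, Nat.testBit_add_one]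
    ring

theorem pvSubsum_concat (q : List Int) (x : Int) :
    pvSubsum (q ++ [x]) = pvSubsum q ++ (pvSubsum q).map (fun s => s + x) := by
  simp [pvSubsum, List.foldl_append]

theorem pvSubsum_length (q : List Int) : (pvSubsum q).length = 2 ^ q.length := by
  induction q using List.reverseRecOn with
  | nil => simp [pvSubsum]
  | append_singleton q x ih =>
    rw [pvSubsum_concat]
    simp [ih]
    ring

theorem pvSubsum_getD (q : List Int) : ∀ m, m < 2 ^ q.length →
    (pvSubsum q).getD m 0 = pvCostBits q m := by
  induction q using List.reverseRecOn with
  | nil =>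
    intro m hm
    have : m = 0 := Nat.lt_one_iff.mp (by simpa using hm)
    subst this
    simp [pvSubsum, pvCostBits]
  | append_singleton q x ih =>
    intro m hm
    rw [List.length_append, List.length_singleton] at hm
    rw [pvSubsum_concat, pvCostBits_concat]
    have hlen : (pvSubsum q).length = 2 ^ q.length := pvSubsum_length q
    by_cases h : m < 2 ^ q.length
    · rw [List.getD_append _ _ _ _ (by omega)]
      rw [ih m h, Nat.testBit_lt_two_pow h]
      simp
    · have h2 : (2:Nat) ^ (q.length + 1) = 2 * 2 ^ q.length := by ring
      have hm2 : m - 2 ^ q.length < 2 ^ q.length := by omega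
      have hge : 2 ^ q.length ≤ m := by omega
      rw [List.getD_append_right _ _ _ _ (by omega), hlen]
      have hmap : ((pvSubsum q).map (fun s => s + x)).getD (m - 2 ^ q.length) 0
          = (pvSubsum q).getD (m - 2 ^ q.length) 0 + x := by
        rw [List.getD_eq_getElem _ _ (by simpa [hlen] using hm2),
          List.getD_eq_getElem _ _ (by simpa [hlen] using hm2)]
        simp
      have htb : m.testBit q.length = true := by
        have hd : m / 2 ^ q.length = 1 :=
          Nat.div_eq_of_lt_le (by simpa using hge)
            (by rw [show (1+1)*2^q.length = 2^(q.length+1) by ring]; exact hm)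
        rw [Nat.testBit, Nat.shiftRight_eq_div_pow, hd]
        rfl
      have hmod : m - 2 ^ q.length = m % 2 ^ q.length := by
        rw [Nat.mod_eq_sub_mod hge, Nat.mod_eq_of_lt hm2]
      rw [hmap, ih _ hm2, hmod, pvCostBits_mod, htb]
      simp

theorem pvAny_set_add (nxt : List Nat) (v : Nat) (P : Nat → Bool) :
    (PySem.Set.add nxt v).any P = (nxt.any P || P v) := by
  unfold PySem.Set.add
  by_cases h : PySem.Set.contains nxt v
  · rw [if_pos h]
    have hv : v ∈ nxt := List.mem_of_elem_eq_true h
    cases hP : P v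
    · simp
    · simp [List.any_of_mem hv hP]
  · rw [if_neg h]
    simp

theorem pvExpandLoop_bound (ss : List Int) (x : Int) (s l : Nat) (hs : s < 2 ^ l) :
    ∀ sub nxt, sub ≤ s → (∀ t ∈ nxt, t < 2 ^ l) →
      ∀ t ∈ pvExpandLoop ss x s nxt sub, t < 2 ^ l := by
  intro sub
  induction sub using Nat.strong_induction_on with
  | _ sub ih =>
    intro nxt hsub hnxt t ht
    rw [pvExpandLoop] at ht
    by_cases h0 : sub = 0
    · rw [if_pos h0] at ht
      exact hnxt t ht
    · rw [if_neg h0] at ht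
      have hdec : (sub - 1) &&& s < sub := by
        have := Nat.and_le_left (n := sub - 1) (m := s)
        omega
      refine ih _ hdec _ (Nat.and_le_right) ?_ t ht
      intro u hu
      by_cases hc : decide (ss.getD sub 0 ≤ x) = true
      · rw [if_pos hc] at hu
        rcases (PySem.Set.mem_add nxt (s ^^^ sub) u).mp hu with hu | hu
        · exact hnxt u hu
        · subst hu
          exact Nat.xor_lt_two_pow hs (by omega)
      · rw [if_neg hc] at hu
        exact hnxt u hu

theorem pvExpandLoop_any (q : List Int) (x : Int) (P : Nat → Bool) (s : Nat)
    (hs : s < 2 ^ q.length) :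
    ∀ sub nxt, sub ≤ s →
      (pvExpandLoop (pvSubsum q) x s nxt sub).any P = (nxt.any P || pvLoopA q x P s sub) := by
  intro sub
  induction sub using Nat.strong_induction_on with
  | _ sub ih =>
    intro nxt hsub
    rw [pvExpandLoop, pvLoopA]
    by_cases h0 : sub = 0
    · simp [h0]
    · rw [if_neg h0, if_neg h0]
      have hdec : (sub - 1) &&& s < sub := by
        have := Nat.and_le_left (n := sub - 1) (m := s)
        omega
      rw [ih _ hdec _ (Nat.and_le_right)]
      have hss : (pvSubsum q).getD sub 0 = pvCostA q sub := by
        rw [pvSubsum_getD q sub (by omega), pvCostA_eq]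
      rw [hss]
      by_cases hc : decide (pvCostA q sub ≤ x) = true
      · rw [if_pos hc, pvAny_set_add]
        cases hP : P (s ^^^ sub)
        · simp
        · simp [(of_decide_eq_true hc : pvCostA q sub ≤ x)]
      · rw [if_neg hc]
        simp only [Bool.not_eq_true] at hc
        simp [hc]

theorem pvExpand_any (q : List Int) (x : Int) (P : Nat → Bool) :
    ∀ (L : List Nat) (nxt0 : PySem.Set Nat), (∀ s ∈ L, s < 2 ^ q.length) →
      ((L.foldl (fun nxt s => pvExpandLoop (pvSubsum q) x s nxt s) nxt0).any P)
        = (nxt0.any P || L.any (fun s => pvLoopA q x P s s)) := by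
  intro L
  induction L with
  | nil => intro nxt0 _; simp
  | cons s L ihL =>
    intro nxt0 hb
    have hs : s < 2 ^ q.length := hb s (by simp)
    rw [List.foldl_cons, ihL _ (fun t ht => hb t (by simp [ht]))]
    rw [pvExpandLoop_any q x P s hs s nxt0 le_rfl]
    simp [Bool.or_assoc]

theorem pvExpand_bound (ss : List Int) (x : Int) (l : Nat) :
    ∀ (L : List Nat) (nxt0 : PySem.Set Nat), (∀ s ∈ L, s < 2 ^ l) → (∀ t ∈ nxt0, t < 2 ^ l) →
      ∀ t ∈ L.foldl (fun nxt s => pvExpandLoop ss x s nxt s) nxt0, t < 2 ^ l := by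
  intro L
  induction L with
  | nil => intro nxt0 _ h0 t ht; exact h0 t ht
  | cons s L ihL =>
    intro nxt0 hb h0
    have hs : s < 2 ^ l := hb s (by simp)
    rw [List.foldl_cons]
    exact ihL _ (fun t ht => hb t (by simp [ht]))
      (pvExpandLoop_bound ss x s l hs s nxt0 le_rfl h0)

theorem pvReach_eq (q : List Int) : ∀ (cnt : List Int) (L : PySem.Set Nat),
    (∀ s ∈ L, s < 2 ^ q.length) →
    pvReach (pvSubsum q) cnt L = L.any (fun s => pvDfsA q cnt s) := by
  intro cnt
  induction cnt with
  | nil =>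
    intro L _
    rw [pvReach]
    show L.elem 0 = L.any fun s => pvDfsA q [] s
    rw [show L.elem 0 = L.any (fun s => s == 0) from (List.any_beq').symm]
    apply PySem.List.any_congr_mem
    intro s _
    simp only [pvDfsA]
    by_cases h : s = 0 <;> simp [h]
  | cons x rest ih =>
    intro L hb
    rw [pvReach]
    by_cases h0 : PySem.Set.contains L 0
    · rw [if_pos h0]
      have hv : (0:Nat) ∈ L := List.mem_of_elem_eq_true h0
      exact (List.any_of_mem hv (by simp [pvDfsA])).symm
    · rw [if_neg h0]
      have hnot0 : ∀ s ∈ L, s ≠ 0 := by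
        intro s hsL hse
        subst hse
        exact h0 (List.elem_eq_true_of_mem hsL)
      rw [ih _ (pvExpand_bound _ x _ L PySem.Set.empty hb (by simp [PySem.Set.empty]))]
      rw [pvExpand_any q x _ L PySem.Set.empty hb]
      have : ∀ s ∈ L, pvLoopA q x (pvDfsA q rest) s s = pvDfsA q (x :: rest) s := by
        intro s hsL
        rw [pvDfsA, if_neg (hnot0 s hsL)]
      rw [PySem.List.any_congr_mem this]
      simp [PySem.Set.empty]

-- ===== VERDICT (by name: the statement is the Claim_ definition above) =====
theorem lc_1655_spec : Claim_equal_lc_1655 := by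
  intro nums quantity _
  have hpos : (0:Nat) < 2 ^ quantity.length := Nat.two_pow_pos _
  have hn : 1 <<< quantity.length - 1 < 2 ^ quantity.length := by
    rw [Nat.one_shiftLeft]; omega
  simp only [Spec_lc_1655, lc_1655, lc_1655_alt]
  have hof : PySem.Set.ofList [1 <<< quantity.length - 1] = [1 <<< quantity.length - 1] := rfl
  rw [hof, pvReach_eq quantity _ _ (by intro s hs; simp at hs; omega)]
  simp
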